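-- pv_equiv track=rewrite | github.com/ReksioCroft/tema3-lfa-gramaticiFNC | main.py | eliminareInutile
-- ===== SOURCE A (Python) =====
-- def eliminareInutile( gramatica ):
--     def inaccesibil():
--
--         def dfs( neterminal ):
--             vizitate[ neterminal ] = True
--             for i in gramatica[ neterminal ]:
--                 for litera in i:
--                     if litera.isupper() == True and vizitate[ litera ] == False:
--                         dfs( litera )
--
--         vizitate = { x: False for x in gramatica }
--         dfs( 'S' )
--         for i in vizitate:
--             if vizitate[ i ] == False:
--                 gramatica.pop( i, None )
--
--     def neterminate():
--         eliminate = set()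
--
--     inaccesibil()  # eliminam starile inaccesibile
--     neterminate()  # eliminam starile ce nu se termina
--     return gramatica
-- ===== SOURCE B (Python) =====
-- def eliminareInutile(gramatica):
--     # Iterative reachability with an explicit worklist instead of recursion;
--     # mutates gramatica in place (deletes unreachable keys) like the original.
--     reachable = set()
--     stack = ['S']
--     while stack:
--         neterminal = stack.pop()
--         if neterminal in reachable:
--             continue
--         productions = gramatica[neterminal]  # KeyError for unknown symbols, as in the original
--         reachable.add(neterminal)
--         for productie in productions:
--             for litera in productie:
--                 if litera.isupper() and litera not in reachable:
--                     stack.append(litera)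
--     for cheie in [x for x in gramatica if x not in reachable]:
--         del gramatica[cheie]
--     return gramatica
-- ===== Notes on version B (the rewrite author's own statement) =====
-- stated objective: alternative
-- what changed: The recursive DFS over the grammar is replaced by an iterative worklist traversal (explicit stack + reachable set, no recursion); the final removal iterates once over the keys filtered against the reachable set.
-- outside the precondition, e.g. on eliminareInutile({'S': ['a'], 'B': ['X']}): A returns {'S': ['a']}, B returns {'S': ['a']}
import Mathlib
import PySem

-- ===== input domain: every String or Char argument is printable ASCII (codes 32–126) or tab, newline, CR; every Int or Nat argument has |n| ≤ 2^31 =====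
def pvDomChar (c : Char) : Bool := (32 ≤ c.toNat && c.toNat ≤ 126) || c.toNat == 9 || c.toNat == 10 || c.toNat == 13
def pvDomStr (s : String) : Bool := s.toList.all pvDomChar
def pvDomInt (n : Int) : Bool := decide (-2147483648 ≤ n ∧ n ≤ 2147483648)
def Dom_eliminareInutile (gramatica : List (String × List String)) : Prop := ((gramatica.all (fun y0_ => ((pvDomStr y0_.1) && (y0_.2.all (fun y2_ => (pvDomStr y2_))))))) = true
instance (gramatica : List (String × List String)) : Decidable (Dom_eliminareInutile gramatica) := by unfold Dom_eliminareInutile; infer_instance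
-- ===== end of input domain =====

-- B replaces A's recursive DFS by an iterative worklist traversal (same cost); both mutate the
-- input dict in place in Python — the equivalence proved here is about the returned dict.


-- ===== PORT A =====
-- dfs(neterminal): vizitate[neterminal] = True; for i in gramatica[neterminal]: for litera in i:
--   if litera.isupper() and vizitate[litera] == False: dfs(litera)
-- Fuel-structured recursion (a fuel of g.size + 1 always suffices on admitted inputs, proved
-- below); `none` is exactly Python's KeyError (missing grammar key / missing vizitate key).
def pvDfsA (g : PySem.Dict String (List String)) :
    Nat → String → PySem.Dict String Bool → Option (PySem.Dict String Bool)
  | 0, _, _ => none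
  | Nat.succ fuel, neterminal, vizitate =>
    let viz := vizitate.insert neterminal true
    match g.get? neterminal with
    | none => none
    | some prods =>
      prods.foldl (fun acc i =>
        i.toList.foldl (fun acc litera =>
          match acc with
          | none => none
          | some viz =>
            if PySem.Chars.isupper litera then
              match viz.get? (String.ofList [litera]) with
              | none => none
              | some b => if b = false then pvDfsA g fuel (String.ofList [litera]) viz else some viz
            else some viz) acc) (some viz)

def eliminareInutile (gramatica : List (String × List String)) : List (String × List String) :=
  let g := PySem.Dict.ofList gramatica
  -- vizitate = { x: False for x in gramatica }
  let vizitate : PySem.Dict String Bool := PySem.Dict.ofList (g.keys.map (fun x => (x, false)))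
  match pvDfsA g (g.size + 1) "S" vizitate with
  | none => gramatica        -- Python raises KeyError here: outside Pre_
  | some viz =>
    -- for i in vizitate: if vizitate[i] == False: gramatica.pop(i, None)
    (viz.keys.foldl (fun g' i => if viz.get? i == some false then g'.erase i else g') g).items

-- ===== PORT B =====
-- Python list used as a stack: represented with its TOP at the HEAD (append = cons, pop = head).
def pvLoopB (g : PySem.Dict String (List String)) :
    Nat → List String → PySem.Set String → Option (PySem.Set String)
  | 0, _, _ => none
  | Nat.succ fuel, stack, reachable =>
    match stack with
    | [] => some reachable
    | neterminal :: rest =>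
      if PySem.Set.contains reachable neterminal then pvLoopB g fuel rest reachable
      else
        match g.get? neterminal with
        | none => none     -- KeyError, as in Source B
        | some productions =>
          let reachable := PySem.Set.add reachable neterminal
          let stack := productions.foldl (fun st productie =>
            productie.toList.foldl (fun st litera =>
              if PySem.Chars.isupper litera && !(PySem.Set.contains reachable (String.ofList [litera]))
              then String.ofList [litera] :: st else st) st) rest
          pvLoopB g fuel stack reachable

-- total number of production letters (used only to size the loop fuel)
def pvTotalLen (g : PySem.Dict String (List String)) : Nat :=
  (g.items.map (fun p => (p.2.map (fun s => s.toList.length)).sum)).sum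

def eliminareInutile_alt (gramatica : List (String × List String)) : List (String × List String) :=
  let g := PySem.Dict.ofList gramatica
  match pvLoopB g (2 + g.size * (pvTotalLen g + 2)) ["S"] PySem.Set.empty with
  | none => gramatica        -- Python raises KeyError here: outside Pre_
  | some reachable =>
    ((g.keys.filter (fun x => !(PySem.Set.contains reachable x))).foldl
      (fun g' k => g'.erase k) g).items

-- ===== PRECONDITION & SPEC =====
-- Pre_ excludes (i) association lists with duplicate keys (not representable as a Python dict),
-- (ii) grammars where 'S' is missing or some production mentions an uppercase symbol that is not
-- a grammar key: on reachable such symbols both A and B raise KeyError; unreachable ones are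
-- conservatively excluded too (A returns there and B matches), since reachability is not a
-- closed-form condition on the input.
def Pre_eliminareInutile (gramatica : List (String × List String)) : Prop :=
  (gramatica.map Prod.fst).Nodup ∧
  "S" ∈ gramatica.map Prod.fst ∧
  (gramatica.all (fun p => p.2.all (fun s => s.toList.all (fun c =>
      !(PySem.Chars.isupper c) || (gramatica.map Prod.fst).contains (String.ofList [c]))))) = true
instance (gramatica : List (String × List String)) : Decidable (Pre_eliminareInutile gramatica) := by
  unfold Pre_eliminareInutile; infer_instance

def pvWitness_eliminareInutile : (List (String × List String)) :=
  [("S", ["aB"]), ("B", []), ("C", ["c"])]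

def Spec_eliminareInutile (gramatica : List (String × List String)) (out : List (String × List String)) : Prop := out = eliminareInutile_alt gramatica
instance (gramatica : List (String × List String)) (out : List (String × List String)) : Decidable (Spec_eliminareInutile gramatica out) := by unfold Spec_eliminareInutile; infer_instance

-- ===== CLAIM (what is proved, stated in full; the proofs are below) =====
def Claim_equal_eliminareInutile : Prop := ∀ (gramatica : List (String × List String)), Dom_eliminareInutile gramatica → Pre_eliminareInutile gramatica → Spec_eliminareInutile gramatica (eliminareInutile gramatica)

-- ===== LEMMAS AND PROOFS =====

-- one production step: u's productions mention the (uppercase) letter of v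
def pvEdge (g : PySem.Dict String (List String)) (u v : String) : Prop :=
  ∃ prods, g.get? u = some prods ∧ ∃ s ∈ prods, ∃ c ∈ s.toList,
    PySem.Chars.isupper c = true ∧ v = String.ofList [c]

-- a well-formed grammar: 'S' present, every uppercase production letter is a key
def pvGood (g : PySem.Dict String (List String)) : Prop :=
  g.keys.Nodup ∧ "S" ∈ g.keys ∧ ∀ u prods, g.get? u = some prods → ∀ s ∈ prods, ∀ c ∈ s.toList,
    PySem.Chars.isupper c = true → String.ofList [c] ∈ g.keys

-- number of keys still marked False (A's fuel measure)
def pvNFalse (g : PySem.Dict String (List String)) (viz : PySem.Dict String Bool) : Nat :=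
  g.keys.countP (fun k => viz.get? k == some false)

-- "every True key outside G has all its successors True"
def pvClosedExc (g : PySem.Dict String (List String)) (G : Set String)
    (viz : PySem.Dict String Bool) : Prop :=
  ∀ u v, u ∉ G → viz.get? u = some true → pvEdge g u v → viz.get? v = some true

theorem pv_countP_update (K : List String) (hnd : K.Nodup) (nt : String) (h : nt ∈ K)
    (p q : String → Bool) (hp : p nt = true) (hq : q nt = false)
    (hoth : ∀ k ∈ K, k ≠ nt → p k = q k) : K.countP q + 1 = K.countP p := by
  have hperm : K.Perm (nt :: K.erase nt) := List.perm_cons_erase h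
  rw [hperm.countP_eq q, hperm.countP_eq p, List.countP_cons, List.countP_cons, hp, hq]
  have : (K.erase nt).countP q = (K.erase nt).countP p := by
    refine List.countP_congr (fun x hx => ?_)
    have hxe := (List.Nodup.mem_erase_iff hnd).1 hx
    rw [hoth x hxe.2 hxe.1]
  simp [this]

theorem pv_nFalse_le_of_mono (g : PySem.Dict String (List String))
    (viz viz' : PySem.Dict String Bool) (hk : viz.keys = g.keys)
    (hm : ∀ k, viz.get? k = some true → viz'.get? k = some true) :
    pvNFalse g viz' ≤ pvNFalse g viz := by
  refine List.countP_mono_left (fun k hmem hfk => ?_)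
  simp only [beq_iff_eq] at hfk ⊢
  rcases hb : viz.get? k with _ | b
  · exact absurd (by rw [hk]; exact hmem)
      ((PySem.Dict.get?_eq_none_iff_not_mem_keys viz k).1 hb)
  · cases b
    · rfl
    · rw [hm k hb] at hfk; cases hfk


theorem pvClosedExc_anti (g : PySem.Dict String (List String)) {G G' : Set String}
    (h : G ⊆ G') (viz : PySem.Dict String Bool) (hc : pvClosedExc g G viz) :
    pvClosedExc g G' viz :=
  fun u v hu htu he => hc u v (fun hm => hu (h hm)) htu he

theorem pv_mem_keys_of_get?_some {ν : Type} (d : PySem.Dict String ν) (k : String) (v : ν)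
    (h : d.get? k = some v) : k ∈ d.keys := by
  by_contra hm
  rw [(PySem.Dict.get?_eq_none_iff_not_mem_keys d k).2 hm] at h
  cases h

theorem pv_get?_isSome_of_mem {ν : Type} (d : PySem.Dict String ν) (k : String)
    (h : k ∈ d.keys) : ∃ v, d.get? k = some v := by
  rcases hv : d.get? k with _ | v
  · exact absurd ((PySem.Dict.get?_eq_none_iff_not_mem_keys d k).1 hv) (fun hc => hc h)
  · exact ⟨v, rfl⟩

theorem pvDfsA_fold (g : PySem.Dict String (List String)) (hg : pvGood g) (fuel : Nat)
    (nt : String) (prods : List String) (hnt : g.get? nt = some prods) (G : Set String)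
    (IH : ∀ (nt' : String) (viz : PySem.Dict String Bool),
      viz.keys = g.keys → viz.get? nt' = some false → pvNFalse g viz < fuel →
      pvClosedExc g (insert nt' (insert nt G)) viz →
      ∃ viz', pvDfsA g fuel nt' viz = some viz' ∧ viz'.keys = g.keys ∧
        (∀ k, viz.get? k = some true → viz'.get? k = some true) ∧
        viz'.get? nt' = some true ∧
        (∀ k, viz'.get? k = some true →
          viz.get? k = some true ∨ Relation.ReflTransGen (pvEdge g) nt' k) ∧
        pvClosedExc g (insert nt G) viz') :
    ∀ (L : List Char) (viz : PySem.Dict String Bool),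
    (∀ c ∈ L, ∃ s ∈ prods, c ∈ s.toList) →
    viz.keys = g.keys → pvNFalse g viz < fuel →
    pvClosedExc g (insert nt G) viz →
    ∃ viz', L.foldl (fun acc litera => match acc with
        | none => none
        | some viz => if PySem.Chars.isupper litera then
            match viz.get? (String.ofList [litera]) with
            | none => none
            | some b => if b = false then pvDfsA g fuel (String.ofList [litera]) viz else some viz
          else some viz) (some viz) = some viz' ∧
      viz'.keys = g.keys ∧
      (∀ k, viz.get? k = some true → viz'.get? k = some true) ∧
      (∀ k, viz'.get? k = some true →
        viz.get? k = some true ∨ Relation.ReflTransGen (pvEdge g) nt k) ∧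
      pvClosedExc g (insert nt G) viz' ∧
      (∀ c ∈ L, PySem.Chars.isupper c = true → viz'.get? (String.ofList [c]) = some true) ∧
      pvNFalse g viz' ≤ pvNFalse g viz := by
  intro L
  induction L with
  | nil =>
    intro viz _ hkeys _ hclosed
    exact ⟨viz, rfl, hkeys, fun _ h => h, fun _ h => Or.inl h, hclosed, by simp, le_refl _⟩
  | cons c L ih =>
    intro viz hL hkeys hlt hclosed
    simp only [List.foldl_cons]
    by_cases hup : PySem.Chars.isupper c = true
    · obtain ⟨s, hs, hc⟩ := hL c (List.mem_cons_self ..)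
      have hedge : pvEdge g nt (String.ofList [c]) := ⟨prods, hnt, s, hs, c, hc, hup, rfl⟩
      have hmemk : String.ofList [c] ∈ g.keys := hg.2.2 nt prods hnt s hs c hc hup
      obtain ⟨b, hb⟩ := pv_get?_isSome_of_mem viz _ (hkeys ▸ hmemk)
      cases b with
      | true =>
        obtain ⟨viz', heq, hk', hmono, hsound, hcl', hlet, hnf⟩ :=
          ih viz (fun c hcm => hL c (List.mem_cons_of_mem _ hcm)) hkeys hlt hclosed
        refine ⟨viz', ?_, hk', hmono, hsound, hcl', ?_, hnf⟩
        · simpa [hup, hb] using heq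
        · intro c' hc' hup'
          rcases List.mem_cons.1 hc' with rfl | hmem
          · exact hmono _ hb
          · exact hlet c' hmem hup'
      | false =>
        obtain ⟨viz₂, heq₂, hk₂, hmono₂, htrue₂, hsound₂, hcl₂⟩ :=
          IH (String.ofList [c]) viz hkeys hb hlt
            (pvClosedExc_anti g (Set.subset_insert _ _) viz hclosed)
        have hlt₂ : pvNFalse g viz₂ < fuel :=
          lt_of_le_of_lt (pv_nFalse_le_of_mono g viz viz₂ hkeys hmono₂) hlt
        obtain ⟨viz', heq, hk', hmono, hsound, hcl', hlet, hnf⟩ :=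
          ih viz₂ (fun c hcm => hL c (List.mem_cons_of_mem _ hcm)) hk₂ hlt₂ hcl₂
        refine ⟨viz', ?_, hk', fun k hk => hmono k (hmono₂ k hk), ?_, hcl', ?_, ?_⟩
        · simpa [hup, hb, heq₂] using heq
        · intro k htk
          rcases hsound k htk with h₂ | hrtg
          · rcases hsound₂ k h₂ with h | hrtg'
            · exact Or.inl h
            · exact Or.inr (Relation.ReflTransGen.head hedge hrtg')
          · exact Or.inr hrtg
        · intro c' hc' hup'
          rcases List.mem_cons.1 hc' with rfl | hmem
          · exact hmono _ htrue₂
          · exact hlet c' hmem hup'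
        · exact le_trans hnf (pv_nFalse_le_of_mono g viz viz₂ hkeys hmono₂)
    · obtain ⟨viz', heq, hk', hmono, hsound, hcl', hlet, hnf⟩ :=
        ih viz (fun c hcm => hL c (List.mem_cons_of_mem _ hcm)) hkeys hlt hclosed
      refine ⟨viz', ?_, hk', hmono, hsound, hcl', ?_, hnf⟩
      · simpa [hup] using heq
      · intro c' hc' hup'
        rcases List.mem_cons.1 hc' with rfl | hmem
        · exact absurd hup' hup
        · exact hlet c' hmem hup'

theorem pvDfsA_main (g : PySem.Dict String (List String)) (hg : pvGood g) :
    ∀ fuel (nt : String) (viz : PySem.Dict String Bool) (G : Set String),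
    viz.keys = g.keys →
    viz.get? nt = some false →
    pvNFalse g viz < fuel →
    pvClosedExc g (insert nt G) viz →
    ∃ viz', pvDfsA g fuel nt viz = some viz' ∧
      viz'.keys = g.keys ∧
      (∀ k, viz.get? k = some true → viz'.get? k = some true) ∧
      viz'.get? nt = some true ∧
      (∀ k, viz'.get? k = some true →
        viz.get? k = some true ∨ Relation.ReflTransGen (pvEdge g) nt k) ∧
      pvClosedExc g G viz' := by
  intro fuel
  induction fuel with
  | zero => intro nt viz G _ _ hlt _; omega
  | succ fuel ihf =>
    intro nt viz G hkeys hfalse hlt hclosed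
    have hntk : nt ∈ g.keys := hkeys ▸ pv_mem_keys_of_get?_some viz nt false hfalse
    obtain ⟨prods, hnt⟩ := pv_get?_isSome_of_mem g nt hntk
    have hcont : viz.contains nt = true :=
      (PySem.Dict.contains_iff_mem_keys ..).2 (hkeys ▸ hntk)
    have hk1 : (viz.insert nt true).keys = g.keys := by
      rw [PySem.Dict.keys_insert_of_contains viz true hcont]; exact hkeys
    have hget1 : ∀ k, (viz.insert nt true).get? k = if k = nt then some true else viz.get? k :=
      fun k => PySem.Dict.get?_insert viz nt k true
    have hnf1 : pvNFalse g (viz.insert nt true) + 1 = pvNFalse g viz :=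
      pv_countP_update g.keys hg.1 nt hntk _ _ (by simp [hfalse])
        (by simp [hget1]) (fun k _ hne => by simp [hget1, hne])
    have hmono1 : ∀ k, viz.get? k = some true → (viz.insert nt true).get? k = some true := by
      intro k h
      rw [hget1]
      by_cases hkn : k = nt
      · simp [hkn]
      · simpa [hkn] using h
    have hcl1 : pvClosedExc g (insert nt G) (viz.insert nt true) := by
      intro u v hu htu hedge
      have hune : u ≠ nt := fun h => hu (h ▸ Set.mem_insert _ _)
      rw [hget1, if_neg hune] at htu
      exact hmono1 v (hclosed u v hu htu hedge)
    have hlt1 : pvNFalse g (viz.insert nt true) < fuel := by omega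
    obtain ⟨viz', heq, hk', hmono', hsound', hcl', hlet, _⟩ :=
      pvDfsA_fold g hg fuel nt prods hnt G
        (fun nt' viz h1 h2 h3 h4 => ihf nt' viz (insert nt G) h1 h2 h3 h4)
        ((prods.map String.toList).flatten) (viz.insert nt true)
        (fun c hcm => by
          obtain ⟨l, hl, hcl⟩ := List.mem_flatten.1 hcm
          obtain ⟨s, hs, rfl⟩ := List.mem_map.1 hl
          exact ⟨s, hs, hcl⟩)
        hk1 hlt1 hcl1
    have hrun : pvDfsA g (Nat.succ fuel) nt viz
        = ((prods.map String.toList).flatten).foldl (fun acc litera => match acc with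
            | none => none
            | some viz => if PySem.Chars.isupper litera then
                match viz.get? (String.ofList [litera]) with
                | none => none
                | some b => if b = false then pvDfsA g fuel (String.ofList [litera]) viz
                  else some viz
              else some viz) (some (viz.insert nt true)) := by
      rw [List.foldl_flatten, List.foldl_map]
      simp only [pvDfsA, hnt]
    refine ⟨viz', by rw [hrun]; exact heq, hk', fun k h => hmono' k (hmono1 k h), ?_, ?_, ?_⟩
    · exact hmono' nt (by rw [hget1]; simp)
    · intro k htk
      rcases hsound' k htk with h1 | hrtg
      · rw [hget1] at h1
        by_cases hkn : k = nt
        · exact Or.inr (hkn ▸ Relation.ReflTransGen.refl)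
        · exact Or.inl (by rwa [if_neg hkn] at h1)
      · exact Or.inr hrtg
    · intro u v hu htu hedge
      by_cases hun : u = nt
      · subst hun
        obtain ⟨prods', hget', s, hs, c, hc, hup, rfl⟩ := hedge
        rw [hnt] at hget'
        injection hget' with hpe
        subst hpe
        exact hlet c (List.mem_flatten.2 ⟨s.toList, List.mem_map.2 ⟨s, hs, rfl⟩, hc⟩) hup
      · exact hcl' u v (fun hmem => (Set.mem_insert_iff.1 hmem).elim hun hu) htu hedge

theorem pvLoopB_fold (reach2 : PySem.Set String) :
    ∀ (L : List Char) (st : List String),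
    (∀ s ∈ st, s ∈ L.foldl (fun st litera =>
        if PySem.Chars.isupper litera && !(PySem.Set.contains reach2 (String.ofList [litera]))
        then String.ofList [litera] :: st else st) st) ∧
    (∀ s ∈ L.foldl (fun st litera =>
        if PySem.Chars.isupper litera && !(PySem.Set.contains reach2 (String.ofList [litera]))
        then String.ofList [litera] :: st else st) st,
      s ∈ st ∨ ∃ c ∈ L, PySem.Chars.isupper c = true ∧ s = String.ofList [c]) ∧
    (∀ c ∈ L, PySem.Chars.isupper c = true →
      String.ofList [c] ∈ reach2 ∨ String.ofList [c] ∈ L.foldl (fun st litera =>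
        if PySem.Chars.isupper litera && !(PySem.Set.contains reach2 (String.ofList [litera]))
        then String.ofList [litera] :: st else st) st) ∧
    (L.foldl (fun st litera =>
        if PySem.Chars.isupper litera && !(PySem.Set.contains reach2 (String.ofList [litera]))
        then String.ofList [litera] :: st else st) st).length ≤ st.length + L.length := by
  intro L
  induction L with
  | nil => exact fun st => ⟨fun s h => h, fun s h => Or.inl h, by simp, by simp⟩
  | cons c L ih =>
    intro st
    simp only [List.foldl_cons]
    by_cases hcond : (PySem.Chars.isupper c && !(PySem.Set.contains reach2 (String.ofList [c]))) = true
    · rw [if_pos hcond]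
      obtain ⟨ih1, ih2, ih3, ih4⟩ := ih (String.ofList [c] :: st)
      refine ⟨fun s hs => ih1 s (List.mem_cons_of_mem _ hs), fun s hs => ?_, fun c' hc' hup' => ?_, by simp only [List.length_cons] at ih4 ⊢; omega⟩
      · rcases ih2 s hs with hst | ⟨c', hc', hup', rfl⟩
        · rcases List.mem_cons.1 hst with rfl | hst'
          · exact Or.inr ⟨c, List.mem_cons_self .., (by rw [Bool.and_eq_true] at hcond; exact hcond.1), rfl⟩
          · exact Or.inl hst'
        · exact Or.inr ⟨c', List.mem_cons_of_mem _ hc', hup', rfl⟩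
      · rcases List.mem_cons.1 hc' with rfl | hmem
        · exact Or.inr (ih1 _ (List.mem_cons_self ..))
        · exact ih3 c' hmem hup'
    · rw [if_neg hcond]
      obtain ⟨ih1, ih2, ih3, ih4⟩ := ih st
      refine ⟨ih1, fun s hs => (ih2 s hs).imp id
          (fun ⟨c', hc', hup', he⟩ => ⟨c', List.mem_cons_of_mem _ hc', hup', he⟩),
        fun c' hc' hup' => ?_, by simp only [List.length_cons]; omega⟩
      rcases List.mem_cons.1 hc' with rfl | hmem
      · left
        rcases hcc : PySem.Set.contains reach2 (String.ofList [c']) with _ | _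
        · exact absurd (by rw [Bool.and_eq_true, hup', hcc]; exact ⟨rfl, rfl⟩) hcond
        · exact List.contains_iff_mem.1 hcc
      · exact ih3 c' hmem hup'

theorem pvLoopB_main (g : PySem.Dict String (List String)) (hg : pvGood g) :
    ∀ fuel (stack : List String) (reach : PySem.Set String),
    (∀ s ∈ stack, s ∈ g.keys ∧ Relation.ReflTransGen (pvEdge g) "S" s) →
    (∀ s ∈ reach, Relation.ReflTransGen (pvEdge g) "S" s) →
    (∀ u ∈ reach, ∀ v, pvEdge g u v → v ∈ reach ∨ v ∈ stack) →
    stack.length + (g.keys.countP (fun k => !(List.contains reach k))) * (pvTotalLen g + 2) < fuel →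
    ∃ reach', pvLoopB g fuel stack reach = some reach' ∧
      (∀ s ∈ reach, s ∈ reach') ∧ (∀ s ∈ stack, s ∈ reach') ∧
      (∀ s ∈ reach', Relation.ReflTransGen (pvEdge g) "S" s) ∧
      (∀ u ∈ reach', ∀ v, pvEdge g u v → v ∈ reach') := by
  intro fuel
  induction fuel with
  | zero => intro stack reach _ _ _ hlt; omega
  | succ fuel ihf =>
    intro stack reach hstack hreach hclosed hlt
    cases stack with
    | nil =>
      refine ⟨reach, by simp [pvLoopB], fun s h => h, by simp, hreach, ?_⟩
      intro u hu v he
      exact (hclosed u hu v he).resolve_right (by simp)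
    | cons nt rest =>
      simp only [pvLoopB]
      rcases hvis : PySem.Set.contains reach nt with _ | _
      · -- nt not yet reachable: visit it
        rw [if_neg (by simp)]
        obtain ⟨hntK, hntR⟩ := hstack nt (List.mem_cons_self ..)
        obtain ⟨prods, hget⟩ := pv_get?_isSome_of_mem g nt hntK
        simp only [hget]
        have hvisL : List.contains reach nt = false := hvis
        have hadd : PySem.Set.add reach nt = reach ++ [nt] := by
          simp only [PySem.Set.add]
          rw [if_neg (by rw [hvis]; simp)]
        have hmem2 : ∀ x, x ∈ PySem.Set.add reach nt ↔ x ∈ reach ∨ x = nt := by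
          intro x; rw [hadd]; simp
        have hLmem : ∀ c ∈ (prods.map String.toList).flatten, ∃ s ∈ prods, c ∈ s.toList := by
          intro c hcm
          obtain ⟨l, hl, hcl⟩ := List.mem_flatten.1 hcm
          obtain ⟨s, hs, rfl⟩ := List.mem_map.1 hl
          exact ⟨s, hs, hcl⟩
        have hfoldeq : prods.foldl (fun st productie =>
              productie.toList.foldl (fun st litera =>
                if PySem.Chars.isupper litera &&
                    !(PySem.Set.contains (PySem.Set.add reach nt) (String.ofList [litera]))
                then String.ofList [litera] :: st else st) st) rest
            = ((prods.map String.toList).flatten).foldl (fun st litera =>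
                if PySem.Chars.isupper litera &&
                    !(PySem.Set.contains (PySem.Set.add reach nt) (String.ofList [litera]))
                then String.ofList [litera] :: st else st) rest := by
          rw [List.foldl_flatten, List.foldl_map]
        obtain ⟨f1, f2, f3, f4⟩ :=
          pvLoopB_fold (PySem.Set.add reach nt) ((prods.map String.toList).flatten) rest
        have hedge_of : ∀ c ∈ (prods.map String.toList).flatten,
            PySem.Chars.isupper c = true → pvEdge g nt (String.ofList [c]) := by
          intro c hcm hup
          obtain ⟨s, hs, hcs⟩ := hLmem c hcm
          exact ⟨prods, hget, s, hs, c, hcs, hup, rfl⟩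
        -- the new stack
        set stack2 := ((prods.map String.toList).flatten).foldl (fun st litera =>
            if PySem.Chars.isupper litera &&
                !(PySem.Set.contains (PySem.Set.add reach nt) (String.ofList [litera]))
            then String.ofList [litera] :: st else st) rest with hstack2
        -- fuel bookkeeping
        have hU : g.keys.countP (fun k => !(List.contains (PySem.Set.add reach nt) k)) + 1
            = g.keys.countP (fun k => !(List.contains reach k)) := by
          refine pv_countP_update g.keys hg.1 nt hntK _ _ (by rw [hvisL]; rfl) ?_ ?_
          · have : List.contains (PySem.Set.add reach nt) nt = true :=
              List.contains_iff_mem.2 ((hmem2 nt).2 (Or.inr rfl))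
            rw [this]; rfl
          · intro k _ hne
            have h2 : List.contains reach k = List.contains (PySem.Set.add reach nt) k := by
              rw [Bool.eq_iff_iff]
              simp only [List.contains_iff_mem, hmem2 k]
              tauto
            rw [h2]
        have hLlen : ((prods.map String.toList).flatten).length ≤ pvTotalLen g := by
          have hmemit : (nt, prods) ∈ g.items := PySem.Dict.mem_items_of_get?_eq_some g hget
          have : (prods.map (fun s => s.toList.length)).sum ≤ pvTotalLen g := by
            refine List.single_le_sum (fun x _ => Nat.zero_le x) _ ?_
            exact List.mem_map.2 ⟨(nt, prods), hmemit, rfl⟩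
          simpa [List.length_flatten, List.map_map, Function.comp] using this
        have hfuel2 : stack2.length
            + (g.keys.countP (fun k => !(List.contains (PySem.Set.add reach nt) k)))
              * (pvTotalLen g + 2) < fuel := by
          rw [← hU, Nat.succ_mul] at hlt
          have h4 := f4
          simp only [List.length_cons] at hlt
          generalize hP : (g.keys.countP (fun k => !(List.contains (PySem.Set.add reach nt) k)))
            * (pvTotalLen g + 2) = P at hlt ⊢
          omega
        obtain ⟨reach', heq, hmono', hstk', hsound', hclosed'⟩ :=
          ihf stack2 (PySem.Set.add reach nt)
            (by
              intro s hs
              rcases f2 s hs with hrest | ⟨c, hc, hup, rfl⟩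
              · exact hstack s (List.mem_cons_of_mem _ hrest)
              · obtain ⟨s', hs', hcs'⟩ := hLmem c hc
                exact ⟨hg.2.2 nt prods hget s' hs' c hcs' hup,
                  Relation.ReflTransGen.tail hntR (hedge_of c hc hup)⟩)
            (by
              intro s hs
              rcases (hmem2 s).1 hs with h | rfl
              · exact hreach s h
              · exact hntR)
            (by
              intro u hu v he
              rcases (hmem2 u).1 hu with h | rfl
              · rcases hclosed u h v he with hv | hv
                · exact Or.inl ((hmem2 v).2 (Or.inl hv))
                · rcases List.mem_cons.1 hv with rfl | hv'
                  · exact Or.inl ((hmem2 v).2 (Or.inr rfl))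
                  · exact Or.inr (f1 v hv')
              · obtain ⟨prods', hget', s, hs, c, hc, hup, rfl⟩ := he
                rw [hget] at hget'
                injection hget' with hpe
                subst hpe
                have hcL : c ∈ (prods.map String.toList).flatten :=
                  List.mem_flatten.2 ⟨s.toList, List.mem_map.2 ⟨s, hs, rfl⟩, hc⟩
                rcases f3 c hcL hup with h | h
                · exact Or.inl h
                · exact Or.inr h)
            hfuel2
        refine ⟨reach', by rw [hfoldeq]; exact heq,
          fun s h => hmono' s ((hmem2 s).2 (Or.inl h)), ?_, hsound', hclosed'⟩
        intro s hs
        rcases List.mem_cons.1 hs with rfl | hrest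
        · exact hmono' s ((hmem2 s).2 (Or.inr rfl))
        · exact hstk' s (f1 s hrest)
      · -- nt already reachable: skip
        simp only [reduceIte]
        have hfuel1 : rest.length
            + (g.keys.countP (fun k => !(List.contains reach k))) * (pvTotalLen g + 2) < fuel := by
          simp only [List.length_cons] at hlt
          generalize hP : (g.keys.countP (fun k => !(List.contains reach k)))
            * (pvTotalLen g + 2) = P at hlt ⊢
          omega
        obtain ⟨reach', heq, hmono', hstk', hsound', hclosed'⟩ :=
          ihf rest reach (fun s h => hstack s (List.mem_cons_of_mem _ h)) hreach
            (by
              intro u hu v he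
              rcases hclosed u hu v he with hv | hv
              · exact Or.inl hv
              · rcases List.mem_cons.1 hv with rfl | hv'
                · exact Or.inl (List.contains_iff_mem.1 hvis)
                · exact Or.inr hv')
            hfuel1
        refine ⟨reach', heq, hmono', ?_, hsound', hclosed'⟩
        intro s hs
        rcases List.mem_cons.1 hs with rfl | hrest
        · exact hmono' s (List.contains_iff_mem.1 hvis)
        · exact hstk' s hrest

theorem pv_foldl_erase_items (d : PySem.Dict String (List String)) (l : List String) :
    (l.foldl (fun d' k => d'.erase k) d).items
      = d.items.filter (fun p => !(l.contains p.1)) := by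
  induction l generalizing d with
  | nil => simp
  | cons k l ih =>
    simp only [List.foldl_cons]
    rw [ih]
    have he : (d.erase k).items = d.items.filter (fun p => !(p.1 == k)) := rfl
    rw [he, List.filter_filter]
    refine List.filter_congr (fun p _ => ?_)
    by_cases hpk : p.1 = k <;> simp [hpk]

-- ===== VERDICT (by name: the statement is the Claim_ definition above) =====
theorem eliminareInutile_spec : Claim_equal_eliminareInutile := by
  intro gramatica _hdom hpre
  obtain ⟨hnd, hS, hupb⟩ := hpre
  have hup : ∀ p ∈ gramatica, ∀ s ∈ p.2, ∀ c ∈ s.toList,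
      PySem.Chars.isupper c = true → String.ofList [c] ∈ gramatica.map Prod.fst := by
    intro p hp s hs c hc hupc
    have h1 := List.all_eq_true.1 (List.all_eq_true.1 (List.all_eq_true.1 hupb p hp) s hs) c hc
    rw [hupc] at h1
    simp only [Bool.not_true, Bool.false_or] at h1
    exact List.contains_iff_mem.1 h1
  set g : PySem.Dict String (List String) := PySem.Dict.ofList gramatica with hgdef
  have hitems : g.items = gramatica := by
    simpa using PySem.Dict.items_foldl_insert_fresh gramatica Prod.fst Prod.snd
      PySem.Dict.empty (fun a _ => PySem.Dict.contains_empty ..) hnd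
  have hkeys : g.keys = gramatica.map Prod.fst := by
    simp only [PySem.Dict.keys, hitems]
  have hknd : g.keys.Nodup := by rw [hkeys]; exact hnd
  have hgood : pvGood g := by
    refine ⟨hknd, by rw [hkeys]; exact hS, ?_⟩
    intro u prods hgetu s hs c hc hupc
    have hmem : (u, prods) ∈ g.items := PySem.Dict.mem_items_of_get?_eq_some g hgetu
    rw [hitems] at hmem
    rw [hkeys]
    exact hup (u, prods) hmem s hs c hc hupc
  -- the initial vizitate dict of A
  set viz0 : PySem.Dict String Bool := PySem.Dict.ofList (g.keys.map (fun x => (x, false)))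
    with hviz0def
  have hviz0items : viz0.items = g.keys.map (fun x => (x, false)) := by
    simpa using PySem.Dict.items_foldl_insert_fresh (g.keys.map (fun x => (x, false)))
      Prod.fst Prod.snd PySem.Dict.empty (fun a _ => PySem.Dict.contains_empty ..)
      (by simpa [List.map_map, Function.comp_def] using hknd)
  have hviz0keys : viz0.keys = g.keys := by
    simp only [PySem.Dict.keys, hviz0items, List.map_map]
    simp [Function.comp_def]
  have hviz0get : ∀ k ∈ g.keys, viz0.get? k = some false := by
    intro k hk
    have hm : (k, false) ∈ viz0.items := by
      rw [hviz0items]; exact List.mem_map.2 ⟨k, hk, rfl⟩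
    have hn : viz0.keys.Nodup := by rw [hviz0keys]; exact hknd
    exact PySem.Dict.get?_of_mem_items viz0 hm hn
  have hnotrue : ∀ k, viz0.get? k ≠ some true := by
    intro k h
    have hm := PySem.Dict.mem_items_of_get?_eq_some viz0 h
    rw [hviz0items] at hm
    obtain ⟨x, _, hx⟩ := List.mem_map.1 hm
    cases hx
  have hsize : g.size = g.keys.length := by
    simp [PySem.Dict.size, PySem.Dict.keys]
  have hnf0 : pvNFalse g viz0 < g.size + 1 := by
    have := List.countP_le_length (l := g.keys) (p := fun k => viz0.get? k == some false)
    unfold pvNFalse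
    omega
  obtain ⟨viz', hAeq, hk', hmono', htS, hsound', hcl'⟩ :=
    pvDfsA_main g hgood (g.size + 1) "S" viz0 ∅ hviz0keys (hviz0get "S" hgood.2.1) hnf0
      (fun u v _ htu _ => absurd htu (hnotrue u))
  have hAiff : ∀ k, viz'.get? k = some true ↔ Relation.ReflTransGen (pvEdge g) "S" k := by
    intro k
    constructor
    · intro h
      rcases hsound' k h with h0 | hrtg
      · exact absurd h0 (hnotrue k)
      · exact hrtg
    · intro h
      induction h with
      | refl => exact htS
      | tail _ he ih => exact hcl' _ _ (Set.notMem_empty _) ih he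
  have hfuelB : (1 : Nat) + (g.keys.countP (fun k => !(List.contains (PySem.Set.empty : PySem.Set String) k)))
      * (pvTotalLen g + 2) < 2 + g.size * (pvTotalLen g + 2) := by
    have h1 : g.keys.countP (fun k => !(List.contains (PySem.Set.empty : PySem.Set String) k)) ≤ g.size := by
      rw [hsize]; exact List.countP_le_length
    have := Nat.mul_le_mul_right (pvTotalLen g + 2) h1
    omega
  obtain ⟨reach', hBeq, _, hstkS, hsoundB, hclB⟩ :=
    pvLoopB_main g hgood (2 + g.size * (pvTotalLen g + 2)) ["S"] PySem.Set.empty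
      (by
        intro s hs
        rw [List.mem_singleton] at hs
        subst hs
        exact ⟨hgood.2.1, Relation.ReflTransGen.refl⟩)
      (by simp [PySem.Set.empty])
      (by simp [PySem.Set.empty])
      (by simpa using hfuelB)
  have hBiff : ∀ k, k ∈ reach' ↔ Relation.ReflTransGen (pvEdge g) "S" k := by
    intro k
    constructor
    · exact hsoundB k
    · intro h
      induction h with
      | refl => exact hstkS "S" (List.mem_singleton.2 rfl)
      | tail _ he ih => exact hclB _ ih _ he
  -- now compute both sides
  show eliminareInutile gramatica = eliminareInutile_alt gramatica
  rw [eliminareInutile, eliminareInutile_alt]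
  rw [← hgdef, ← hviz0def, hAeq, hBeq]
  dsimp only
  rw [hk']
  rw [← List.foldl_filter, pv_foldl_erase_items, pv_foldl_erase_items]
  refine List.filter_congr ?_
  intro p hp
  have hpk : p.1 ∈ g.keys := by
    simp only [PySem.Dict.keys]
    exact List.mem_map.2 ⟨p, hp, rfl⟩
  have hcontA : ((g.keys.filter (fun i => viz'.get? i == some false)).contains p.1)
      = ((g.keys.filter (fun x => !(PySem.Set.contains reach' x))).contains p.1) := by
    rw [Bool.eq_iff_iff]
    simp only [List.contains_iff_mem, List.mem_filter]
    obtain ⟨b, hb⟩ := pv_get?_isSome_of_mem viz' p.1 (by rw [hk']; exact hpk)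
    have hnotmem : ¬ p.1 ∈ reach' ↔ ¬ Relation.ReflTransGen (pvEdge g) "S" p.1 :=
      not_congr (hBiff p.1)
    cases b
    · have hnr : ¬ Relation.ReflTransGen (pvEdge g) "S" p.1 := by
        intro hr
        rw [(hAiff p.1).2 hr] at hb
        cases hb
      have hcf : PySem.Set.contains reach' p.1 = false := by
        rcases hc : PySem.Set.contains reach' p.1 with _ | _
        · rfl
        · exact absurd ((hBiff p.1).1 (List.contains_iff_mem.1 hc)) hnr
      constructor
      · rintro ⟨hk, -⟩
        exact ⟨hk, by rw [hcf]; rfl⟩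
      · rintro ⟨hk, -⟩
        exact ⟨hk, by rw [hb]; rfl⟩
    · have hr : Relation.ReflTransGen (pvEdge g) "S" p.1 := (hAiff p.1).1 hb
      have hct : PySem.Set.contains reach' p.1 = true :=
        List.contains_iff_mem.2 ((hBiff p.1).2 hr)
      constructor
      · rintro ⟨-, hfalse⟩
        rw [hb] at hfalse
        simp at hfalse
      · rintro ⟨-, hnc⟩
        rw [hct] at hnc
        simp at hnc
  rw [hcontA]
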